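-- pv_equiv track=rewrite | github.com/B-S-Arnold/bugHunt | bugSprAI/debug_test.py | _find_if_block_indent
-- ===== SOURCE A (Python) =====
-- def _find_if_block_indent(previous_lines: list) -> int:
--     """Find the indentation level (in increments of 4) of the matching if statement"""
--     for line in reversed(previous_lines):
--         stripped = line.strip()
--         if stripped:
--             first_word = stripped.split()[0]
--             if first_word in ('if', 'elif'):
--                 spaces = len(line) - len(line.lstrip())
--                 return spaces // 4
--     return 0
-- ===== SOURCE B (Python) =====
-- def _find_if_block_indent(previous_lines: list) -> int:
--     """Find the indentation level (in increments of 4) of the matching if statement"""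
--     result = 0
--     for line in previous_lines:
--         stripped = line.strip()
--         if stripped and stripped.split()[0] in ('if', 'elif'):
--             result = (len(line) - len(line.lstrip())) // 4
--     return result
-- ===== Notes on version B (the rewrite author's own statement) =====
-- stated objective: alternative
-- what changed: Replaces A's reverse scan with early return by a single forward fold that overwrites an accumulator with the indent of each qualifying line, returning the last one (default 0).
import Mathlib
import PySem

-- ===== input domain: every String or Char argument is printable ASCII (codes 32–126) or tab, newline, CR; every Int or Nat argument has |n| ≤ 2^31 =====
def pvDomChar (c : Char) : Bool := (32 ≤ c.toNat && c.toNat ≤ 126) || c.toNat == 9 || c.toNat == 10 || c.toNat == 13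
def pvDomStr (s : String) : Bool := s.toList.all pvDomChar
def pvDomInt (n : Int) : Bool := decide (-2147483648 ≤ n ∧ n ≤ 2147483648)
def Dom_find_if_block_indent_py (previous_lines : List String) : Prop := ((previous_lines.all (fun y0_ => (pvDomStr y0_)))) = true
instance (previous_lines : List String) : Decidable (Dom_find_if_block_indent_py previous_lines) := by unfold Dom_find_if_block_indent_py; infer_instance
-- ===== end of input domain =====

-- ===== PORT A =====
-- B replaces A's reverse scan + early return by one forward fold keeping the last qualifying indent (alternative decomposition, same cost).
-- Port of A's `for line in reversed(previous_lines): ...` with early return.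
-- `stripped.split()[0]` is ported as `.getD ""`: when `stripped ≠ ""`, `split()` is nonempty, so the IndexError branch is unreachable.
def find_if_block_indent_py_go : List String → Int
  | [] => 0
  | line :: rest =>
    let stripped := PySem.Str.strip line
    if stripped ≠ "" then
      let first_word := (PySem.List.pyGet? (PySem.Str.split₀ stripped) 0).getD ""
      if first_word = "if" ∨ first_word = "elif" then
        PySem.Int.floordiv (PySem.Str.len line - PySem.Str.len (PySem.Str.lstrip line)) 4
      else find_if_block_indent_py_go rest
    else find_if_block_indent_py_go rest

def find_if_block_indent_py (previous_lines : List String) : Int :=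
  find_if_block_indent_py_go previous_lines.reverse

-- ===== PORT B =====
-- the loop body of B: overwrite the accumulator when the line qualifies
def pvStep (result : Int) (line : String) : Int :=
  let stripped := PySem.Str.strip line
  if stripped ≠ "" ∧
      ((PySem.List.pyGet? (PySem.Str.split₀ stripped) 0).getD "" = "if" ∨
       (PySem.List.pyGet? (PySem.Str.split₀ stripped) 0).getD "" = "elif") then
    PySem.Int.floordiv (PySem.Str.len line - PySem.Str.len (PySem.Str.lstrip line)) 4
  else result

def find_if_block_indent_py_alt (previous_lines : List String) : Int :=
  previous_lines.foldl pvStep 0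

-- ===== PRECONDITION & SPEC =====
def Spec_find_if_block_indent_py (previous_lines : List String) (out : Int) : Prop := out = find_if_block_indent_py_alt previous_lines
instance (previous_lines : List String) (out : Int) : Decidable (Spec_find_if_block_indent_py previous_lines out) := by unfold Spec_find_if_block_indent_py; infer_instance

-- ===== CLAIM (what is proved, stated in full; the proofs are below) =====
def Claim_equal_find_if_block_indent_py : Prop := ∀ (previous_lines : List String), Dom_find_if_block_indent_py previous_lines → Spec_find_if_block_indent_py previous_lines (find_if_block_indent_py previous_lines)

-- ===== LEMMAS AND PROOFS =====

-- whether a line qualifies, and the indent value A/B compute for it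
def pvCond (line : String) : Bool :=
  PySem.Str.strip line != "" &&
    ((PySem.List.pyGet? (PySem.Str.split₀ (PySem.Str.strip line)) 0).getD "" == "if" ||
     (PySem.List.pyGet? (PySem.Str.split₀ (PySem.Str.strip line)) 0).getD "" == "elif")

def pvVal (line : String) : Int :=
  PySem.Int.floordiv (PySem.Str.len line - PySem.Str.len (PySem.Str.lstrip line)) 4

-- the first qualifying line's indent, scanning left to right
def pvFirst : List String → Option Int
  | [] => none
  | line :: rest => if pvCond line then some (pvVal line) else pvFirst rest

theorem pvStep_eq (r : Int) (x : String) :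
    pvStep r x = if pvCond x then pvVal x else r := by
  simp only [pvStep, pvCond, pvVal, Bool.and_eq_true, Bool.or_eq_true, bne_iff_ne,
    beq_iff_eq]

theorem go_cons (y : String) (ys : List String) :
    find_if_block_indent_py_go (y :: ys) =
      if pvCond y then pvVal y else find_if_block_indent_py_go ys := by
  simp only [find_if_block_indent_py_go, pvCond, pvVal, Bool.and_eq_true, Bool.or_eq_true,
    bne_iff_ne, beq_iff_eq]
  by_cases h1 : PySem.Str.strip y ≠ ""
  · by_cases h2 : (PySem.List.pyGet? (PySem.Str.split₀ (PySem.Str.strip y)) 0).getD "" = "if" ∨ (PySem.List.pyGet? (PySem.Str.split₀ (PySem.Str.strip y)) 0).getD "" = "elif"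
    · rw [if_pos h1, if_pos h2, if_pos ⟨h1, h2⟩]
    · rw [if_pos h1, if_neg h2, if_neg (fun h => h2 h.2)]
  · rw [if_neg h1, if_neg (fun h => h1 h.1)]

theorem pvFirst_append (ys : List String) (x : String) :
    pvFirst (ys ++ [x]) = (pvFirst ys).or (pvFirst [x]) := by
  induction ys with
  | nil => simp [pvFirst]
  | cons y ys ih =>
    simp only [List.cons_append, pvFirst, ih]
    by_cases h : pvCond y <;> simp [h]

theorem go_eq_first (ys : List String) :
    find_if_block_indent_py_go ys = (pvFirst ys).getD 0 := by
  induction ys with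
  | nil => rfl
  | cons y ys ih =>
    rw [go_cons, ih]
    simp only [pvFirst]
    by_cases h : pvCond y <;> simp [h]

theorem foldl_eq_first (l : List String) (init : Int) :
    List.foldl pvStep init l = (pvFirst l.reverse).getD init := by
  induction l generalizing init with
  | nil => rfl
  | cons x l ih =>
    rw [List.foldl_cons, ih, List.reverse_cons, pvFirst_append]
    rcases h : pvFirst l.reverse with _ | a
    · rw [pvStep_eq]
      simp only [Option.or, pvFirst]
      by_cases hc : pvCond x <;> simp [hc]
    · simp

-- ===== VERDICT (by name: the statement is the Claim_ definition above) =====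
theorem find_if_block_indent_py_spec : Claim_equal_find_if_block_indent_py := by
  intro previous_lines _
  unfold Spec_find_if_block_indent_py find_if_block_indent_py find_if_block_indent_py_alt
  rw [go_eq_first, foldl_eq_first]
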